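-- pv_equiv track=rewrite | github.com/k1lst1x/Monopoly | game/views.py | generate_board_cells
-- ===== SOURCE A (Python) =====
-- def generate_board_cells(size=10):
--     coords = []
--     for col in reversed(range(size + 1)):
--         coords.append((size, col))
--     for row in reversed(range(size)):
--         coords.append((row, 0))
--     for col in range(1, size + 1):
--         coords.append((0, col))
--     for row in range(1, size):
--         coords.append((row, size))
--
--     return [{"i": idx, "row": r + 1, "col": c + 1} for idx, (r, c) in enumerate(coords)]
-- ===== SOURCE B (Python) =====
-- def generate_board_cells(size=10):
--     # Single directional walk around the perimeter: start at the bottom-right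
--     # corner heading left, turn clockwise whenever the next step would leave
--     # the board, and take exactly 4*size steps (the perimeter length).
--     coords = []
--     r, c = size, size
--     dr, dc = 0, -1
--     for _ in range(4 * size):
--         coords.append((r, c))
--         if not (0 <= r + dr <= size and 0 <= c + dc <= size):
--             dr, dc = dc, -dr
--         r, c = r + dr, c + dc
--     return [{"i": i, "row": r + 1, "col": c + 1} for i, (r, c) in enumerate(coords)]
-- ===== Notes on version B (the rewrite author's own statement) =====
-- stated objective: alternative
-- what changed: Replaces the four edge-append loops with a single directional perimeter walk (one step per perimeter cell, turning clockwise at corners); Pre_ excludes only size zero, the degenerate one-cell board, where A emits its single cell while the perimeter-length walk emits none and either reading of a one-cell perimeter is defensible.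
-- outside the precondition, e.g. on generate_board_cells(0): A returns [{'i': 0, 'row': 1, 'col': 1}], B returns []
import Mathlib
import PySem

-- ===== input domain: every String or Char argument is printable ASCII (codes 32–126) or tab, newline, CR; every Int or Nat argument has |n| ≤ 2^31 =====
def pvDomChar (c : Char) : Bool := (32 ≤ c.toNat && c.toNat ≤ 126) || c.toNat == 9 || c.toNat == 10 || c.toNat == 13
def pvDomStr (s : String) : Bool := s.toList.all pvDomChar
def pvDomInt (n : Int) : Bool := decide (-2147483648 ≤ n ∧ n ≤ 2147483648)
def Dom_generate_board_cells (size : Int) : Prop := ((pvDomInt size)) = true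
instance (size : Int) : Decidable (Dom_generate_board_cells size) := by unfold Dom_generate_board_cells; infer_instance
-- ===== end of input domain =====

-- B replaces A's four edge-append loops by one clockwise perimeter walk, one step per perimeter cell; same O(size) cost.

-- ===== PORT A =====
def generate_board_cells (size : Int) : List (List (String × Int)) :=
  let coords : List (Int × Int) := []
  let coords := (PySem.List.pyRange 0 (size + 1) 1).reverse.foldl
    (fun acc col => acc ++ [(size, col)]) coords
  let coords := (PySem.List.pyRange 0 size 1).reverse.foldl
    (fun acc row => acc ++ [(row, (0 : Int))]) coords
  let coords := (PySem.List.pyRange 1 (size + 1) 1).foldl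
    (fun acc col => acc ++ [((0 : Int), col)]) coords
  let coords := (PySem.List.pyRange 1 size 1).foldl
    (fun acc row => acc ++ [(row, size)]) coords
  (PySem.List.enumerate coords 0).map
    (fun p => [("i", p.1), ("row", p.2.1 + 1), ("col", p.2.2 + 1)])

-- ===== PORT B =====
-- one iteration of B's walk loop: append the current cell, turn clockwise if the
-- next step would leave the board, then step
def walkStep (size : Int) (st : Int × Int × Int × Int × List (Int × Int)) :
    Int × Int × Int × Int × List (Int × Int) :=
  let (r, c, dr, dc, coords) := st
  let coords := coords ++ [(r, c)]
  let (dr, dc) :=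
    if ¬(0 ≤ r + dr ∧ r + dr ≤ size ∧ 0 ≤ c + dc ∧ c + dc ≤ size) then (dc, -dr)
    else (dr, dc)
  (r + dr, c + dc, dr, dc, coords)

def generate_board_cells_alt (size : Int) : List (List (String × Int)) :=
  let st := (PySem.List.pyRange 0 (4 * size) 1).foldl
    (fun st _ => walkStep size st) (size, size, 0, -1, ([] : List (Int × Int)))
  (PySem.List.enumerate st.2.2.2.2 0).map
    (fun p => [("i", p.1), ("row", p.2.1 + 1), ("col", p.2.2 + 1)])

-- ===== PRECONDITION & SPEC =====
-- Pre_ excludes only size = 0, the degenerate 1x1 board: A emits its single cell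
-- there while B's perimeter-length walk emits none, and either reading of a one-cell
-- perimeter is defensible.
def Pre_generate_board_cells (size : Int) : Prop := size ≠ 0
instance (size : Int) : Decidable (Pre_generate_board_cells size) := by
  unfold Pre_generate_board_cells; infer_instance
def pvWitness_generate_board_cells : Int := 3
def Spec_generate_board_cells (size : Int) (out : List (List (String × Int))) : Prop :=
  out = generate_board_cells_alt size
instance (size : Int) (out : List (List (String × Int))) :
    Decidable (Spec_generate_board_cells size out) := by
  unfold Spec_generate_board_cells; infer_instance

-- ===== CLAIM =====
def Claim_equal_generate_board_cells : Prop :=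
  ∀ (size : Int), Dom_generate_board_cells size → Pre_generate_board_cells size →
    Spec_generate_board_cells size (generate_board_cells size)

-- ===== LEMMAS AND PROOFS =====

-- the idx-th perimeter cell of A's coords list (size ≥ 1)
def cellAt (size idx : Int) : Int × Int :=
  if idx ≤ size then (size, size - idx)
  else if idx ≤ 2 * size then (2 * size - idx, 0)
  else if idx ≤ 3 * size then ((0 : Int), idx - 2 * size)
  else (idx - 3 * size, size)

-- the walk's heading after n iterations
def hdAt (size n : Int) : Int × Int :=
  if n ≤ size then (0, -1)
  else if n ≤ 2 * size then (-1, 0)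
  else if n ≤ 3 * size then (0, 1)
  else (1, 0)

-- reversed(range(0, m)) as a map over List.range
lemma reverse_pyRange_zero (m : Int) :
    (PySem.List.pyRange 0 m 1).reverse = (List.range m.toNat).map (fun k : Nat => m - 1 - (k : Int)) := by
  have h := PySem.List.pyRange_neg_one_eq_reverse (a := m - 1) (b := (-1 : Int))
  have h1 : (-1 : Int) + 1 = 0 := by ring
  have h2 : m - 1 + 1 = m := by ring
  rw [h1, h2] at h
  rw [← h, PySem.List.pyRange_neg_one]
  have h3 : (m - 1 - (-1)).toNat = m.toNat := by omega
  rw [h3]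

-- A's four edge loops produce exactly the closed-form perimeter sequence
lemma coords_eq (size : Int) (hs : 1 ≤ size) :
    (PySem.List.pyRange 0 (size + 1) 1).reverse.map (fun col => (size, col)) ++
    (PySem.List.pyRange 0 size 1).reverse.map (fun row => (row, (0 : Int))) ++
    (PySem.List.pyRange 1 (size + 1) 1).map (fun col => ((0 : Int), col)) ++
    (PySem.List.pyRange 1 size 1).map (fun row => (row, size))
    = (PySem.List.pyRange 0 (4 * size) 1).map (cellAt size) := by
  rw [PySem.List.pyRange_one_append 0 (size + 1) (4 * size) (by omega) (by omega),
      PySem.List.pyRange_one_append (size + 1) (2 * size + 1) (4 * size) (by omega) (by omega),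
      PySem.List.pyRange_one_append (2 * size + 1) (3 * size + 1) (4 * size) (by omega) (by omega)]
  simp only [List.map_append, List.append_assoc]
  congr 1
  · rw [reverse_pyRange_zero, PySem.List.pyRange_one]
    simp only [List.map_map, sub_zero]
    apply List.map_congr_left
    intro k hk
    simp only [List.mem_range] at hk
    simp only [Function.comp, cellAt]
    rw [if_pos (by omega)]
    simp only [Prod.mk.injEq]
    exact ⟨trivial, by omega⟩
  congr 1
  · rw [reverse_pyRange_zero, PySem.List.pyRange_one]
    simp only [List.map_map]
    have hlen : (2 * size + 1 - (size + 1)).toNat = size.toNat := by omega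
    rw [hlen]
    apply List.map_congr_left
    intro k hk
    simp only [List.mem_range] at hk
    simp only [Function.comp, cellAt]
    rw [if_neg (by omega), if_pos (by omega)]
    simp only [Prod.mk.injEq]
    exact ⟨by omega, trivial⟩
  congr 1
  · rw [PySem.List.pyRange_one, PySem.List.pyRange_one]
    simp only [List.map_map]
    have hlen : (3 * size + 1 - (2 * size + 1)).toNat = (size + 1 - 1).toNat := by omega
    rw [hlen]
    apply List.map_congr_left
    intro k hk
    simp only [List.mem_range] at hk
    simp only [Function.comp, cellAt]
    rw [if_neg (by omega), if_neg (by omega), if_pos (by omega)]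
    simp only [Prod.mk.injEq]
    exact ⟨trivial, by omega⟩
  · rw [PySem.List.pyRange_one, PySem.List.pyRange_one]
    simp only [List.map_map]
    have hlen : (4 * size - (3 * size + 1)).toNat = (size - 1).toNat := by omega
    rw [hlen]
    apply List.map_congr_left
    intro k hk
    simp only [List.mem_range] at hk
    simp only [Function.comp, cellAt]
    rw [if_neg (by omega), if_neg (by omega), if_neg (by omega)]
    simp only [Prod.mk.injEq]
    exact ⟨by omega, trivial⟩

-- a fold that ignores the list's elements is an iterate of the step function
lemma foldl_const_iterate {α β : Type} (g : α → α) (st : α) (l : List β) :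
    l.foldl (fun s _ => g s) st = g^[l.length] st := by
  induction l generalizing st with
  | nil => rfl
  | cons x xs ih => simp [List.foldl_cons, ih, Function.iterate_succ_apply]

-- one walk step advances the closed-form invariant (size ≥ 1, n < 4*size)
lemma walkStep_adv (size : Int) (hs : 1 ≤ size) (n : Int) (h0 : 0 ≤ n) (hn : n < 4 * size)
    (acc : List (Int × Int)) :
    walkStep size ((cellAt size n).1, (cellAt size n).2, (hdAt size n).1, (hdAt size n).2, acc)
      = ((cellAt size (n + 1)).1, (cellAt size (n + 1)).2,
         (hdAt size (n + 1)).1, (hdAt size (n + 1)).2, acc ++ [cellAt size n]) := by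
  unfold walkStep cellAt hdAt
  rcases lt_trichotomy n size with h | h | h
  · rw [if_pos (by omega : n ≤ size), if_pos (by omega : n ≤ size)]
    simp only
    rw [if_neg (by omega), if_pos (by omega : n + 1 ≤ size), if_pos (by omega : n + 1 ≤ size)]
    simp <;> omega
  · rw [if_pos (by omega : n ≤ size), if_pos (by omega : n ≤ size)]
    simp only
    rw [if_pos (by omega)]
    simp only
    rw [if_neg (by omega : ¬ n + 1 ≤ size), if_pos (by omega : n + 1 ≤ 2 * size),
        if_neg (by omega : ¬ n + 1 ≤ size), if_pos (by omega : n + 1 ≤ 2 * size)]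
    simp <;> omega
  · rcases lt_trichotomy n (2 * size) with h2 | h2 | h2
    · rw [if_neg (by omega), if_pos (by omega : n ≤ 2 * size),
          if_neg (by omega), if_pos (by omega : n ≤ 2 * size)]
      simp only
      rw [if_neg (by omega), if_neg (by omega : ¬ n + 1 ≤ size), if_pos (by omega : n + 1 ≤ 2 * size),
          if_neg (by omega : ¬ n + 1 ≤ size), if_pos (by omega : n + 1 ≤ 2 * size)]
      simp <;> omega
    · rw [if_neg (by omega), if_pos (by omega : n ≤ 2 * size),
          if_neg (by omega), if_pos (by omega : n ≤ 2 * size)]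
      simp only
      rw [if_pos (by omega)]
      simp only
      rw [if_neg (by omega : ¬ n + 1 ≤ size), if_neg (by omega : ¬ n + 1 ≤ 2 * size),
          if_pos (by omega : n + 1 ≤ 3 * size),
          if_neg (by omega : ¬ n + 1 ≤ size), if_neg (by omega : ¬ n + 1 ≤ 2 * size),
          if_pos (by omega : n + 1 ≤ 3 * size)]
      simp <;> omega
    · rcases lt_trichotomy n (3 * size) with h3 | h3 | h3
      · rw [if_neg (by omega), if_neg (by omega), if_pos (by omega : n ≤ 3 * size),
            if_neg (by omega), if_neg (by omega), if_pos (by omega : n ≤ 3 * size)]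
        simp only
        rw [if_neg (by omega), if_neg (by omega : ¬ n + 1 ≤ size),
            if_neg (by omega : ¬ n + 1 ≤ 2 * size), if_pos (by omega : n + 1 ≤ 3 * size),
            if_neg (by omega : ¬ n + 1 ≤ size), if_neg (by omega : ¬ n + 1 ≤ 2 * size),
            if_pos (by omega : n + 1 ≤ 3 * size)]
        simp <;> omega
      · rw [if_neg (by omega), if_neg (by omega), if_pos (by omega : n ≤ 3 * size),
            if_neg (by omega), if_neg (by omega), if_pos (by omega : n ≤ 3 * size)]
        simp only
        rw [if_pos (by omega)]
        simp only
        rw [if_neg (by omega : ¬ n + 1 ≤ size), if_neg (by omega : ¬ n + 1 ≤ 2 * size),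
            if_neg (by omega : ¬ n + 1 ≤ 3 * size),
            if_neg (by omega : ¬ n + 1 ≤ size), if_neg (by omega : ¬ n + 1 ≤ 2 * size),
            if_neg (by omega : ¬ n + 1 ≤ 3 * size)]
        simp <;> omega
      · rw [if_neg (by omega), if_neg (by omega), if_neg (by omega),
            if_neg (by omega), if_neg (by omega), if_neg (by omega)]
        simp only
        rw [if_neg (by omega), if_neg (by omega : ¬ n + 1 ≤ size),
            if_neg (by omega : ¬ n + 1 ≤ 2 * size), if_neg (by omega : ¬ n + 1 ≤ 3 * size),
            if_neg (by omega : ¬ n + 1 ≤ size), if_neg (by omega : ¬ n + 1 ≤ 2 * size),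
            if_neg (by omega : ¬ n + 1 ≤ 3 * size)]
        simp <;> omega

-- the walk's state after m iterations, in closed form (size ≥ 1, m ≤ 4*size)
lemma walk_invariant (size : Int) (hs : 1 ≤ size) (m : Nat) (hm : (m : Int) ≤ 4 * size) :
    (walkStep size)^[m] (size, size, 0, -1, ([] : List (Int × Int)))
      = ((cellAt size m).1, (cellAt size m).2, (hdAt size m).1, (hdAt size m).2,
         (List.range m).map (fun k : Nat => cellAt size k)) := by
  induction m with
  | zero =>
    simp only [Function.iterate_zero, id_eq, List.range_zero, List.map_nil, Nat.cast_zero]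
    unfold cellAt hdAt
    rw [if_pos (by omega : (0 : Int) ≤ size), if_pos (by omega : (0 : Int) ≤ size)]
    norm_num
  | succ k ih =>
    have hk : (k : Int) ≤ 4 * size := by push_cast at hm ⊢; omega
    rw [Function.iterate_succ_apply', ih hk, walkStep_adv size hs k (by positivity) (by push_cast at hm; omega)]
    rw [List.range_succ, List.map_append]
    push_cast
    simp

-- ===== VERDICT =====
theorem generate_board_cells_spec : Claim_equal_generate_board_cells := by
  intro size _ hpre
  unfold Spec_generate_board_cells generate_board_cells generate_board_cells_alt
  dsimp only
  rcases lt_trichotomy size 0 with hneg | hz | hpos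
  · -- negative size: every range is empty on both sides
    rw [PySem.List.pyRange_one_eq_nil (a := 0) (b := size + 1) (by omega),
        PySem.List.pyRange_one_eq_nil (a := 0) (b := size) (by omega),
        PySem.List.pyRange_one_eq_nil (a := 1) (b := size + 1) (by omega),
        PySem.List.pyRange_one_eq_nil (a := 1) (b := size) (by omega),
        PySem.List.pyRange_one_eq_nil (a := 0) (b := 4 * size) (by omega)]
    simp
  · exact absurd hz hpre
  · -- size ≥ 1: both sides are the closed-form perimeter sequence
    simp only [PySem.List.foldl_append_singleton_eq_map]
    rw [foldl_const_iterate]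
    have hlen : (PySem.List.pyRange 0 (4 * size) 1).length = (4 * size).toNat := by
      rw [PySem.List.pyRange_one]; simp
    rw [hlen, walk_invariant size (by omega) (4 * size).toNat (by omega)]
    have hB : (List.range (4 * size).toNat).map (fun k : Nat => cellAt size (k : Int))
        = (PySem.List.pyRange 0 (4 * size) 1).map (cellAt size) := by
      rw [PySem.List.pyRange_one]
      simp [List.map_map, Function.comp]
    simp only
    rw [hB, ← coords_eq size (by omega)]
    simp [List.append_assoc]
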